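-- pv_equiv track=rewrite | github.com/elydre/myCmatter | src/tokentools.py | join_long_comments
-- ===== SOURCE A (Python) =====
-- def join_long_comments(tokens):
--     in_comment = False
--     comment = ''
--     pos = 0
--     for i, token in enumerate(tokens):
--         if token[1] == 'slash' and tokens[i+1][1] == 'asterisk' and not in_comment:
--             in_comment = True
--             comment = token[0]
--             pos = i
--         elif in_comment and tokens[i][1] == 'slash' and tokens[i-1][1] == 'asterisk':
--             in_comment = False
--             comment += token[0]
--             tokens[pos] = (comment, 'long_comment')
--             # move the rest of the tokens back
--             for _ in range(i-pos):
--                 tokens[pos+1] = None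
--                 pos += 1
--             comment = ''
--         elif in_comment:
--             comment += token[0]
--     tokens = [t for t in tokens if t is not None]
--     return tokens
-- ===== SOURCE B (Python) =====
-- def join_long_comments(tokens):
--     # Single forward pass building a fresh output list (no mutation of the input,
--     # unlike A, which writes None markers / the merged token into the caller's list).
--     out = []
--     i = 0
--     n = len(tokens)
--     while i < n:
--         tok = tokens[i]
--         if tok[1] == 'slash' and i + 1 < n and tokens[i + 1][1] == 'asterisk':
--             # comment opened: find the first closer `/` immediately preceded by `*`
--             j = i + 2
--             while j < n and not (tokens[j][1] == 'slash' and tokens[j - 1][1] == 'asterisk'):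
--                 j += 1
--             if j < n:
--                 out.append((''.join(t[0] for t in tokens[i:j + 1]), 'long_comment'))
--                 i = j + 1
--             else:
--                 # unterminated comment: keep the tokens unchanged
--                 out.extend(tokens[i:])
--                 i = n
--         else:
--             out.append(tok)
--             i += 1
--     return out
-- ===== Notes on version B (the rewrite author's own statement) =====
-- stated objective: simpler
-- what changed: B builds a fresh output list in one index-based pass with an inner scan that locates the comment closer up front, instead of A's enumerate-driven state machine that mutates the input list in place (writing the merged token and None markers) and filters the Nones out at the end; B never touches the input list.
-- crash fix: A raises IndexError whenever the last token's kind is 'slash' (the tokens[i+1] lookup in the opening test runs off the end); B returns the normally merged token list there. — e.g. on join_long_comments([("x", "word"), ("/", "slash")]): A raises IndexError, B returns [("x", "word"), ("/", "slash")]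
import Mathlib
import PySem

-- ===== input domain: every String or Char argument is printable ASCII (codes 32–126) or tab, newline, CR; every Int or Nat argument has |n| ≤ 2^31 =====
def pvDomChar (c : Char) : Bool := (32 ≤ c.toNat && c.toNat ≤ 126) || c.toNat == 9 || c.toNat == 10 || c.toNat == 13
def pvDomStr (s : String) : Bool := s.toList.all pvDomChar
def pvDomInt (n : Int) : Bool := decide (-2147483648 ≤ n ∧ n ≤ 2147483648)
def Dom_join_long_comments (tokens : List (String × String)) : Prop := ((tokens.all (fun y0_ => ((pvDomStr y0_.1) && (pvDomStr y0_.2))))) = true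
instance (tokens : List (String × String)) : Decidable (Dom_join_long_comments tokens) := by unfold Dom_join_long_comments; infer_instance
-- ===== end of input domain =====

-- B rebuilds the token list in one fresh-output pass (finding each comment's closer up front)
-- instead of A's in-place state machine; equivalence is about the RETURN value only: the Python A
-- mutates its argument list in place (merged token + None markers), B leaves it untouched.

-- ===== PORT A =====
-- Python's `for _ in range(i-pos): tokens[pos+1] = None; pos += 1` — sets indices pos+1..pos+k to None
def pvSetNones (toks : List (Option (String × String))) (pos : Nat) : Nat → List (Option (String × String)) × Nat
  | 0 => (toks, pos)
  | k + 1 => pvSetNones (toks.set (pos + 1) none) (pos + 1) k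

-- A's for-loop over enumerate(tokens), carried as (in_comment, comment, pos) plus the mutable list
-- `toks` (None = Python's None).  Python iterates/reads the LIVE list, but every element it yields or
-- reads (tokens[i], tokens[i+1], tokens[i-1]) is at an index not yet mutated at that moment (mutations
-- only touch indices ≤ i during step i), so the port reads those values from the original list `orig`;
-- `rest` is the not-yet-yielded suffix orig.drop i.  A `none` from pyGet? is Python's IndexError
-- (tokens[i+1] off the end), excluded by Pre_; the port's "" default makes the condition false there.
def pvLoopA (orig : List (String × String)) (inC : Bool) (comment : String) (pos : Nat)
    (toks : List (Option (String × String))) (i : Nat) (rest : List (String × String)) :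
    List (Option (String × String)) :=
  match rest with
  | [] => toks
  | t :: rs =>
    let nxt := match PySem.List.pyGet? orig ((i : Int) + 1) with | some u => u.2 | none => ""
    if t.2 == "slash" && nxt == "asterisk" && !inC then
      pvLoopA orig true t.1 i toks (i + 1) rs
    else
      let prv := match PySem.List.pyGet? orig ((i : Int) - 1) with | some u => u.2 | none => ""
      if inC && t.2 == "slash" && prv == "asterisk" then
        let comment2 := comment ++ t.1
        let toks2 := toks.set pos (some (comment2, "long_comment"))
        let p := pvSetNones toks2 pos (i - pos)
        pvLoopA orig false "" p.2 p.1 (i + 1) rs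
      else if inC then
        pvLoopA orig inC (comment ++ t.1) pos toks (i + 1) rs
      else
        pvLoopA orig inC comment pos toks (i + 1) rs

def join_long_comments (tokens : List (String × String)) : List (String × String) :=
  -- `tokens = [t for t in tokens if t is not None]; return tokens`
  (pvLoopA tokens false "" 0 (tokens.map some) 0 tokens).filterMap id

-- ===== PORT B =====
-- the inner `while j < n and not (tokens[j][1]=='slash' and tokens[j-1][1]=='asterisk'): j += 1`;
-- `fuel` only bounds the iteration count to make the while-loop structurally total
-- (fuel = tokens.length always suffices: the loop runs at most tokens.length - j times)
def pvFindCloseAux (tokens : List (String × String)) : Nat → Nat → Nat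
  | 0, j => j
  | fuel + 1, j =>
    if h : j < tokens.length then
      if (tokens[j].2 == "slash") && ((tokens[j-1]'(Nat.lt_of_le_of_lt (Nat.sub_le j 1) h)).2 == "asterisk") then j
      else pvFindCloseAux tokens fuel (j + 1)
    else j

def pvFindClose (tokens : List (String × String)) (j : Nat) : Nat :=
  pvFindCloseAux tokens tokens.length j

-- the outer `while i < n` loop building `out`; `fuel` again only makes it structurally total
-- (each iteration advances i by at least 1, so fuel = tokens.length suffices from i = 0)
def pvLoopB (tokens : List (String × String)) : Nat → List (String × String) → Nat → List (String × String)
  | 0, out, _ => out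
  | fuel + 1, out, i =>
    if h : i < tokens.length then
      let tok := tokens[i]
      if tok.2 == "slash" && decide (i + 1 < tokens.length) && ((tokens[i+1]?).getD ("", "")).2 == "asterisk" then
        let j := pvFindClose tokens (i + 2)
        if hj : j < tokens.length then
          pvLoopB tokens fuel
            (out ++ [(PySem.Str.join "" ((PySem.List.slice tokens (some (i : Int)) (some ((j : Int) + 1))).map Prod.fst), "long_comment")])
            (j + 1)
        else
          out ++ PySem.List.slice tokens (some (i : Int)) none
      else
        pvLoopB tokens fuel (out ++ [tok]) (i + 1)
    else out

def join_long_comments_alt (tokens : List (String × String)) : List (String × String) :=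
  pvLoopB tokens tokens.length [] 0

-- ===== PRECONDITION & SPEC =====
-- Pre_ excludes exactly the inputs where Python A raises IndexError: a nonempty list whose LAST
-- token has kind 'slash' (the opening test evaluates tokens[i+1] before checking `not in_comment`).
def Pre_join_long_comments (tokens : List (String × String)) : Prop :=
  (tokens.getLast?.all (fun t => !(t.2 == "slash"))) = true
instance (tokens : List (String × String)) : Decidable (Pre_join_long_comments tokens) := by
  unfold Pre_join_long_comments; infer_instance

def pvWitness_join_long_comments : (List (String × String)) :=
  [("/", "slash"), ("*", "asterisk"), ("hi", "word"), ("*", "asterisk"), ("/", "slash"), ("x", "word")]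

-- A raises IndexError whenever the last token's kind is 'slash'; B returns the merged list there.
def Raises_join_long_comments (tokens : List (String × String)) : Prop :=
  (tokens.getLast?.any (fun t => t.2 == "slash")) = true
instance (tokens : List (String × String)) : Decidable (Raises_join_long_comments tokens) := by
  unfold Raises_join_long_comments; infer_instance
def pvRaiseWitness_join_long_comments : (List (String × String)) := [("x", "word"), ("/", "slash")]
def pvRaiseWitnessOut_join_long_comments : List (String × String) := [("x", "word"), ("/", "slash")]

def Spec_join_long_comments (tokens : List (String × String)) (out : List (String × String)) : Prop :=
  out = join_long_comments_alt tokens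
instance (tokens : List (String × String)) (out : List (String × String)) :
    Decidable (Spec_join_long_comments tokens out) := by
  unfold Spec_join_long_comments; infer_instance

-- ===== CLAIM (what is proved, stated in full; the proofs are below) =====
def Claim_equal_join_long_comments : Prop :=
  ∀ (tokens : List (String × String)), Dom_join_long_comments tokens →
    Pre_join_long_comments tokens →
    Spec_join_long_comments tokens (join_long_comments tokens)

-- proved at the bottom by theorem join_long_comments_raises
def Claim_raises_join_long_comments : Prop :=
  (∀ (tokens : List (String × String)), Dom_join_long_comments tokens →
    Raises_join_long_comments tokens → ¬ Pre_join_long_comments tokens) ∧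
  (Dom_join_long_comments (pvRaiseWitness_join_long_comments) ∧
    Raises_join_long_comments (pvRaiseWitness_join_long_comments) ∧
    join_long_comments_alt (pvRaiseWitness_join_long_comments) = pvRaiseWitnessOut_join_long_comments)

-- ===== LEMMAS AND PROOFS =====

-- `''.join` on an empty separator: singleton and snoc shapes (used for A's `comment += token[0]`)
theorem join_empty_single (s : String) : PySem.Str.join "" [s] = s := by
  apply String.ext
  simp [PySem.Str.toList_join, PySem.Chars.join_singleton]

theorem charsJoin_empty_snoc (L : List (List Char)) (p : List Char) :
    PySem.Chars.join [] (L ++ [p]) = PySem.Chars.join [] L ++ p := by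
  induction L with
  | nil => simp [PySem.Chars.join_singleton, PySem.Chars.join_nil]
  | cons q L ih =>
    cases L with
    | nil => simp [PySem.Chars.join_singleton, PySem.Chars.join_cons_cons]
    | cons r L' =>
      simp only [List.cons_append, PySem.Chars.join_cons_cons]
      simp only [List.cons_append] at ih
      simp only [List.nil_append, ih, List.append_assoc]

theorem join_empty_snoc (l : List String) (s : String) :
    PySem.Str.join "" (l ++ [s]) = PySem.Str.join "" l ++ s := by
  apply String.ext
  simp [PySem.Str.toList_join, charsJoin_empty_snoc]

-- the merged-comment text accumulated by A between `pos` and scan position `m` (exclusive)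
def pvMergedStr (tokens : List (String × String)) (pos m : Nat) : String :=
  PySem.Str.join "" (((tokens.drop pos).take (m - pos)).map Prod.fst)

theorem pvMergedStr_snoc (tokens : List (String × String)) (pos m : Nat)
    (hpm : pos ≤ m) (hm : m < tokens.length) :
    pvMergedStr tokens pos m ++ (tokens[m]'hm).1 = pvMergedStr tokens pos (m + 1) := by
  unfold pvMergedStr
  have h1 : m + 1 - pos = (m - pos) + 1 := by omega
  have h2 : (tokens.drop pos)[m - pos]? = some (tokens[m]'hm) := by
    rw [List.getElem?_drop, show pos + (m - pos) = m by omega]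
    exact List.getElem?_eq_getElem hm
  rw [h1, List.take_add_one, h2]
  simp [join_empty_snoc]

theorem pvMergedStr_open (tokens : List (String × String)) (i : Nat) (hi : i < tokens.length) :
    pvMergedStr tokens i (i + 1) = (tokens[i]'hi).1 := by
  have hd : tokens.drop i = tokens[i] :: tokens.drop (i + 1) := (List.getElem_cons_drop hi).symm
  unfold pvMergedStr
  rw [hd, show i + 1 - i = 1 by omega]
  exact join_empty_single _

-- the closing condition `tokens[r][1]=='slash' and tokens[r-1][1]=='asterisk'` as a Bool on r
def pvCloseB (tokens : List (String × String)) (r : Nat) : Bool :=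
  (((tokens[r]?).getD ("", "")).2 == "slash") && (((tokens[r-1]?).getD ("", "")).2 == "asterisk")

theorem pvSetNones_spec (u l : List (Option (String × String))) (pos k : Nat)
    (hu : u.length = pos + 1) (hk : k ≤ l.length) :
    pvSetNones (u ++ l) pos k = (u ++ (List.replicate k none ++ l.drop k), pos + k) := by
  induction k generalizing u l pos with
  | zero => simp [pvSetNones]
  | succ k ih =>
    cases l with
    | nil => simp at hk
    | cons x l' =>
      have hset : (u ++ x :: l').set (pos + 1) none = (u ++ [none]) ++ l' := by
        rw [← hu]; simp
      rw [pvSetNones, hset, ih (u ++ [none]) l' (pos + 1) (by simp [hu]) (by simpa using hk)]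
      simp [List.replicate_succ]
      omega

theorem pvFindCloseAux_cond (tokens : List (String × String)) (j : Nat) (h : j < tokens.length) :
    ((tokens[j].2 == "slash") && ((tokens[j-1]'(Nat.lt_of_le_of_lt (Nat.sub_le j 1) h)).2 == "asterisk"))
      = pvCloseB tokens j := by
  unfold pvCloseB
  rw [List.getElem?_eq_getElem h, List.getElem?_eq_getElem (Nat.lt_of_le_of_lt (Nat.sub_le j 1) h)]
  rfl

theorem pvFindCloseAux_not_lt (tokens : List (String × String)) (fuel : Nat) :
    ∀ j, tokens.length ≤ j + fuel →
    (∀ r, j ≤ r → r < tokens.length → pvCloseB tokens r = false) →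
    ¬ (pvFindCloseAux tokens fuel j < tokens.length) := by
  induction fuel with
  | zero => intro j hf _; simp [pvFindCloseAux]; omega
  | succ fuel ih =>
    intro j hf hno
    simp only [pvFindCloseAux]
    split
    · rename_i h
      rw [pvFindCloseAux_cond tokens j h, hno j (le_refl j) h]
      simp only [Bool.false_eq_true, if_false]
      exact ih (j + 1) (by omega) (fun r hr hrl => hno r (by omega) hrl)
    · assumption

theorem pvFindCloseAux_eq (tokens : List (String × String)) (fuel : Nat) :
    ∀ j m, j ≤ m → (hm : m < tokens.length) → pvCloseB tokens m = true →
    (∀ r, j ≤ r → r < m → pvCloseB tokens r = false) →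
    tokens.length ≤ j + fuel →
    pvFindCloseAux tokens fuel j = m := by
  induction fuel with
  | zero => intro j m hjm hm _ _ hf; omega
  | succ fuel ih =>
    intro j m hjm hm hcl hno hf
    simp only [pvFindCloseAux]
    rw [dif_pos (by omega)]
    rw [pvFindCloseAux_cond tokens j (by omega)]
    by_cases hjeq : j = m
    · subst hjeq; simp [hcl]
    · rw [hno j (le_refl j) (by omega)]
      simp only [Bool.false_eq_true, if_false]
      exact ih (j + 1) m (by omega) hm hcl (fun r hr hrl => hno r (by omega) hrl) (by omega)

theorem pvLoopB_stop (tokens : List (String × String)) (fuel : Nat)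
    (out : List (String × String)) (i : Nat) (h : tokens.length ≤ i) :
    pvLoopB tokens fuel out i = out := by
  cases fuel with
  | zero => rfl
  | succ fuel => simp only [pvLoopB]; rw [dif_neg (by omega)]

theorem pvClean_stop (tokens : List (String × String)) (i : Nat) (c0 : String) (p0 : Nat)
    (tval : List (Option (String × String))) (fuelB : Nat) (h : tokens.length ≤ i) :
    (pvLoopA tokens false c0 p0 (tval ++ (tokens.drop i).map some) i (tokens.drop i)).filterMap id
      = pvLoopB tokens fuelB (tval.filterMap id) i := by
  rw [List.drop_eq_nil_of_le h]
  simp only [pvLoopA, List.map_nil, List.append_nil]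
  rw [pvLoopB_stop tokens fuelB _ i h]

theorem pvInC_stop (tokens : List (String × String)) (pos m : Nat)
    (tval : List (Option (String × String))) (fuelB : Nat) (c : String)
    (hno : ∀ r, pos + 2 ≤ r → r < tokens.length → pvCloseB tokens r = false)
    (hm : tokens.length ≤ m) :
    (pvLoopA tokens true c pos (tval ++ (tokens.drop pos).map some) m (tokens.drop m)).filterMap id
      = (if pvFindClose tokens (pos + 2) < tokens.length then
           pvLoopB tokens fuelB
             (tval.filterMap id ++ [(pvMergedStr tokens pos (pvFindClose tokens (pos + 2) + 1), "long_comment")])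
             (pvFindClose tokens (pos + 2) + 1)
         else tval.filterMap id ++ tokens.drop pos) := by
  rw [List.drop_eq_nil_of_le hm]
  simp only [pvLoopA]
  have hfc : ¬ (pvFindClose tokens (pos + 2) < tokens.length) := by
    unfold pvFindClose
    exact pvFindCloseAux_not_lt tokens tokens.length (pos + 2) (by omega) hno
  rw [if_neg hfc, List.filterMap_append]
  simp

-- the combined loop invariant: A's scan (clean state / in-comment state) tracks B's output pass
theorem pvMain (d : Nat) :
    (∀ (tokens : List (String × String)) (i : Nat) (c0 : String) (p0 : Nat)
        (tval : List (Option (String × String))) (fuelB : Nat),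
      tokens.length ≤ i + d → tval.length = i → tokens.length ≤ i + fuelB →
      (pvLoopA tokens false c0 p0 (tval ++ (tokens.drop i).map some) i (tokens.drop i)).filterMap id
        = pvLoopB tokens fuelB (tval.filterMap id) i)
    ∧
    (∀ (tokens : List (String × String)) (pos m : Nat)
        (tval : List (Option (String × String))) (fuelB : Nat),
      tokens.length ≤ m + d → tval.length = pos → pos < m →
      (hpl : pos < tokens.length) → (tokens[pos]'hpl).2 = "slash" →
      (∀ r, pos + 2 ≤ r → r < m → pvCloseB tokens r = false) →
      tokens.length ≤ m + fuelB →
      (pvLoopA tokens true (pvMergedStr tokens pos m) pos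
          (tval ++ (tokens.drop pos).map some) m (tokens.drop m)).filterMap id
        = (if pvFindClose tokens (pos + 2) < tokens.length then
             pvLoopB tokens fuelB
               (tval.filterMap id ++ [(pvMergedStr tokens pos (pvFindClose tokens (pos + 2) + 1), "long_comment")])
               (pvFindClose tokens (pos + 2) + 1)
           else tval.filterMap id ++ tokens.drop pos)) := by
  induction d with
  | zero =>
    constructor
    · intro tokens i c0 p0 tval fuelB hd hlen hf
      exact pvClean_stop tokens i c0 p0 tval fuelB (by omega)
    · intro tokens pos m tval fuelB hd hlen hpm hpl hsl hno hf
      exact pvInC_stop tokens pos m tval fuelB _ (fun r hr hrl => hno r hr (by omega)) (by omega)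
  | succ d ih =>
    obtain ⟨ihC, ihI⟩ := ih
    constructor
    · -- clean state
      intro tokens i c0 p0 tval fuelB hd hlen hf
      by_cases hi : i < tokens.length
      · have hdrop : tokens.drop i = tokens[i] :: tokens.drop (i + 1) :=
          (List.getElem_cons_drop hi).symm
        cases fuelB with
        | zero => omega
        | succ f =>
        have hpg : PySem.List.pyGet? tokens ((i : Int) + 1) = tokens[i+1]? := by
          rw [show ((i : Int) + 1) = ((i + 1 : Nat) : Int) by push_cast; ring,
            PySem.List.pyGet?_natCast]
        rw [hdrop]
        simp only [pvLoopA, pvLoopB]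
        rw [dif_pos hi, hpg]
        have hord : List.filterMap id (pvLoopA tokens false c0 p0
              (tval ++ List.map some (tokens[i] :: List.drop (i + 1) tokens)) (i + 1)
              (List.drop (i + 1) tokens))
            = pvLoopB tokens f (List.filterMap id tval ++ [tokens[i]]) (i + 1) := by
          have h2 : tval ++ List.map some (tokens[i] :: List.drop (i + 1) tokens)
              = (tval ++ [some tokens[i]]) ++ List.map some (List.drop (i + 1) tokens) := by
            simp only [List.map_cons, List.append_assoc, List.singleton_append]
          rw [h2, ihC tokens (i + 1) c0 p0 (tval ++ [some tokens[i]]) f (by omega)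
            (by simp [hlen]) (by omega)]
          congr 1
          simp [List.filterMap_append]
        by_cases hslh : tokens[i].2 = "slash"
        · cases hnx : tokens[i+1]? with
          | none =>
            -- tokens[i+1] is off the end (Python would raise; Pre_ excludes): both conditions false
            have hi1 : ¬ (i + 1 < tokens.length) := by
              simpa using List.getElem?_eq_none_iff.mp hnx
            simp only [hslh, String.reduceBEq, Bool.not_false, Bool.and_true, Bool.true_and,
              Bool.and_false, Bool.false_and, if_false, hi1, decide_false, Option.getD_none,
              Bool.false_eq_true]
            exact hord
          | some u =>
            have hi1 : i + 1 < tokens.length := (List.getElem?_eq_some_iff.mp hnx).1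
            by_cases hast : u.2 = "asterisk"
            · -- comment opens at i
              have hII := ihI tokens i (i + 1) tval f (by omega) hlen (by omega) hi hslh
                (by intro r hr hrl; omega) (by omega)
              rw [pvMergedStr_open tokens i hi, hdrop] at hII
              simp only [hslh, hast, beq_self_eq_true, Bool.not_false,
                Bool.and_true, if_true, hi1, decide_true, Option.getD_some]
              rw [hII]
              set j := pvFindClose tokens (i + 2) with hj_def
              have hsl1 : PySem.List.slice tokens (some (i : Int)) (some ((j : Int) + 1))
                  = (tokens.drop i).take (j + 1 - i) := by
                rw [show ((j : Int) + 1) = ((j + 1 : Nat) : Int) by push_cast; ring]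
                exact PySem.List.slice_natCast tokens i (j + 1)
              by_cases hjlt : j < tokens.length
              · rw [if_pos hjlt, dif_pos hjlt, hsl1]
                rfl
              · rw [if_neg hjlt, dif_neg hjlt, PySem.List.slice_from_natCast, hdrop]
            · -- next token is not an asterisk: ordinary token
              simp only [hslh, beq_self_eq_true, Bool.not_false, Bool.and_true,
                hi1, decide_true, Option.getD_some,
                show (u.2 == "asterisk") = false by simp [hast],
                Bool.and_false, Bool.false_and, if_false, Bool.false_eq_true]
              exact hord
        · -- ordinary token (not a slash)
          simp only [show (tokens[i].2 == "slash") = false by simp [hslh],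
            Bool.and_false, Bool.false_and, if_false, Bool.false_eq_true]
          exact hord
      · exact pvClean_stop tokens i c0 p0 tval fuelB (by omega)
    · -- in-comment state
      intro tokens pos m tval fuelB hd hlen hpm hpl hsl hno hf
      by_cases hm : m < tokens.length
      · have hdropm : tokens.drop m = tokens[m] :: tokens.drop (m + 1) :=
          (List.getElem_cons_drop hm).symm
        have hm1 : m - 1 < tokens.length := by omega
        have hpgp : PySem.List.pyGet? tokens ((m : Int) - 1) = some (tokens[m-1]'hm1) := by
          rw [show ((m : Int) - 1) = ((m - 1 : Nat) : Int) by omega, PySem.List.pyGet?_natCast]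
          exact List.getElem?_eq_getElem hm1
        rw [hdropm]
        simp only [pvLoopA, Bool.not_true, Bool.and_false, Bool.false_eq_true, if_false]
        rw [hpgp]
        simp only [Bool.true_and, if_true]
        by_cases hcl : (tokens[m].2 == "slash" && (tokens[m-1]'hm1).2 == "asterisk") = true
        · -- the comment closes at m
          rw [if_pos hcl]
          obtain ⟨hcs, hca⟩ := by simpa using hcl
          have hmpos2 : pos + 2 ≤ m := by
            by_contra hlt
            have hmeq : m - 1 = pos := by omega
            simp only [hmeq] at hca
            exact absurd (hsl.symm.trans hca) (by decide)
          have hclB : pvCloseB tokens m = true := by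
            unfold pvCloseB
            rw [List.getElem?_eq_getElem hm, List.getElem?_eq_getElem hm1]
            simp [hcs, hca]
          have hfc : pvFindClose tokens (pos + 2) = m := by
            unfold pvFindClose
            exact pvFindCloseAux_eq tokens tokens.length (pos + 2) m hmpos2 hm hclB hno (by omega)
          rw [pvMergedStr_snoc tokens pos m (by omega) hm]
          have hdrp : tokens.drop pos = tokens[pos] :: tokens.drop (pos + 1) :=
            (List.getElem_cons_drop hpl).symm
          have hset : (tval ++ List.map some (tokens.drop pos)).set pos
                (some (pvMergedStr tokens pos (m + 1), "long_comment"))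
              = (tval ++ [some (pvMergedStr tokens pos (m + 1), "long_comment")])
                ++ List.map some (tokens.drop (pos + 1)) := by
            rw [hdrp, List.map_cons]
            have hgen : ∀ (u : List (Option (String × String))) (x y : Option (String × String)) l,
                (u ++ x :: l).set u.length y = u ++ y :: l := by intros; simp
            have h := hgen tval (some tokens[pos])
              (some (pvMergedStr tokens pos (m + 1), "long_comment"))
              (List.map some (tokens.drop (pos + 1)))
            rw [hlen] at h
            rw [h]
            simp
          rw [hset, pvSetNones_spec (tval ++ [some (pvMergedStr tokens pos (m + 1), "long_comment")])
            (List.map some (tokens.drop (pos + 1))) pos (m - pos) (by simp [hlen]) (by simp; omega)]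
          have hLd : (List.map some (tokens.drop (pos + 1))).drop (m - pos)
              = List.map some (tokens.drop (m + 1)) := by
            rw [← List.map_drop, List.drop_drop, show pos + 1 + (m - pos) = m + 1 by omega]
          simp only [hLd]
          rw [← List.append_assoc]
          rw [ihC tokens (m + 1) "" (pos + (m - pos))
            ((tval ++ [some (pvMergedStr tokens pos (m + 1), "long_comment")])
              ++ List.replicate (m - pos) none) fuelB (by omega) (by simp; omega) (by omega)]
          rw [hfc, if_pos hm]
          congr 1
          simp [List.filterMap_append]
        · -- no closer at m: keep accumulating
          rw [if_neg hcl]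
          have hclB : pvCloseB tokens m = false := by
            unfold pvCloseB
            rw [List.getElem?_eq_getElem hm, List.getElem?_eq_getElem hm1]
            simpa using hcl
          have hII := ihI tokens pos (m + 1) tval fuelB (by omega) hlen (by omega) hpl hsl
            (fun r hr hrl => by
              rcases Nat.lt_or_ge r m with h' | h'
              · exact hno r hr h'
              · have : r = m := by omega
                subst this; exact hclB) (by omega)
          rw [pvMergedStr_snoc tokens pos m (by omega) hm]
          exact hII
      · exact pvInC_stop tokens pos m tval fuelB _
          (fun r hr hrl => hno r hr (by omega)) (by omega)
-- ===== VERDICT (by name: the statement is the Claim_ definition above) =====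
theorem join_long_comments_spec : Claim_equal_join_long_comments := by
  intro tokens _ _
  unfold Spec_join_long_comments join_long_comments join_long_comments_alt
  have h := (pvMain tokens.length).1 tokens 0 "" 0 [] tokens.length (by omega) rfl (by omega)
  simpa using h

@[simp] theorem join_long_comments_raises : Claim_raises_join_long_comments := by
  unfold Claim_raises_join_long_comments
  refine ⟨?_, by decide⟩
  intro tokens _ hr
  unfold Raises_join_long_comments at hr
  unfold Pre_join_long_comments
  cases h : tokens.getLast? with
  | none => rw [h] at hr; simp at hr
  | some t =>
    rw [h] at hr
    simp only [Option.any_some, beq_iff_eq] at hr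
    simp [hr]
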